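-- pv_equiv track=rewrite | github.com/mathbeveridge/asm | aztec/build_tile_triangle.py | replace_zeros
-- ===== SOURCE A (Python) =====
-- def replace_zeros(triangle):
--     new_triangle = [[x for x in row] for row in triangle]
--
--     for row in new_triangle:
--         current_max = 0
--         for idx in reversed(range(len(row))):
--             if row[idx] > current_max:
--                 current_max = row[idx]
--             elif row[idx] == 0 and current_max > 0:
--                 row[idx] = current_max
--
--     return new_triangle
-- ===== SOURCE B (Python) =====
-- def replace_zeros(triangle):
--     result = []
--     for row in triangle:
--         # suffix-maximum table: smax[i] = max(0, row[i], row[i+1], ...), smax[len(row)] = 0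
--         smax = [0]
--         for x in reversed(row):
--             smax.append(max(smax[-1], x, 0))
--         smax.reverse()
--         result.append([s if x == 0 and s > 0 else x for x, s in zip(row, smax[1:])])
--     return result
-- ===== Notes on version B (the rewrite author's own statement) =====
-- stated objective: alternative
-- what changed: Replaces A's in-place right-to-left mutation with a precomputed suffix-maximum table per row followed by an independent comprehension pass over (value, suffix-max) pairs.
import Mathlib
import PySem

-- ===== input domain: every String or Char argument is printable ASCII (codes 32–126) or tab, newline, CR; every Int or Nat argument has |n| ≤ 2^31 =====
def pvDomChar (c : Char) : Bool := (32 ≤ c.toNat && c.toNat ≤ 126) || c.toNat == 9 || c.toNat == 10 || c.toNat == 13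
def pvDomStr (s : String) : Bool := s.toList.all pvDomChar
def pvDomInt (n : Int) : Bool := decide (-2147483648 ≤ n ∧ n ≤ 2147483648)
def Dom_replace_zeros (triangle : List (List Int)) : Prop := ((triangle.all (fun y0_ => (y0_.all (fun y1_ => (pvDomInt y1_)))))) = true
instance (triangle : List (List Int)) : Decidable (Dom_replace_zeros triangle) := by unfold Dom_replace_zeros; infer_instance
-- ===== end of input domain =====

-- B replaces A's in-place right-to-left mutation with a precomputed suffix-max table per row plus a second pass (alternative decomposition; return value only, A does not mutate its argument).
-- ===== PORT A =====
-- A's reversed-index loop over a copied row: foldr carries (rewritten suffix, current_max).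
def pvStepA (x : Int) (acc : List Int × Int) : List Int × Int :=
  if x > acc.2 then (x :: acc.1, x)
  else if x = 0 ∧ acc.2 > 0 then (acc.2 :: acc.1, acc.2)
  else (x :: acc.1, acc.2)

def pvRowA (row : List Int) : List Int := (row.foldr pvStepA ([], 0)).1

def replace_zeros (triangle : List (List Int)) : List (List Int) :=
  triangle.map pvRowA

-- ===== PORT B =====
-- suffix-max table built over reversed(row) then reversed back, as in Source B
def pvSmaxStep (acc : List Int) (x : Int) : List Int :=
  max (max (acc.headD 0) x) 0 :: acc

def pvSmax (row : List Int) : List Int := (row.reverse).foldl pvSmaxStep [0]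

def pvRowB (row : List Int) : List Int :=
  (row.zip (pvSmax row).tail).map (fun p => if p.1 = 0 ∧ p.2 > 0 then p.2 else p.1)

def replace_zeros_alt (triangle : List (List Int)) : List (List Int) :=
  triangle.map pvRowB

-- ===== PRECONDITION & SPEC =====
def Spec_replace_zeros (triangle : List (List Int)) (out : List (List Int)) : Prop := out = replace_zeros_alt triangle
instance (triangle : List (List Int)) (out : List (List Int)) : Decidable (Spec_replace_zeros triangle out) := by unfold Spec_replace_zeros; infer_instance

-- ===== CLAIM (what is proved, stated in full; the proofs are below) =====
def Claim_equal_replace_zeros : Prop := ∀ (triangle : List (List Int)), Dom_replace_zeros triangle → Spec_replace_zeros triangle (replace_zeros triangle)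

-- ===== LEMMAS AND PROOFS =====

lemma pvSmax_foldr (row : List Int) :
    pvSmax row = row.foldr (fun x acc => pvSmaxStep acc x) [0] := by
  simp [pvSmax, List.foldl_reverse]

lemma pvSmax_cons (x : Int) (xs : List Int) :
    pvSmax (x :: xs) = pvSmaxStep (pvSmax xs) x := by
  simp [pvSmax_foldr]

lemma pvSmax_head_nonneg (row : List Int) : 0 ≤ (pvSmax row).headD 0 := by
  cases row with
  | nil => simp [pvSmax_foldr]
  | cons x xs => simp [pvSmax_cons, pvSmaxStep]

lemma pvSmax_shape (row : List Int) :
    pvSmax row = (pvSmax row).headD 0 :: (pvSmax row).tail := by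
  cases row with
  | nil => simp [pvSmax_foldr]
  | cons x xs => simp [pvSmax_cons, pvSmaxStep]

lemma pvFoldA_snd (row : List Int) :
    (row.foldr pvStepA ([], 0)).2 = (pvSmax row).headD 0 := by
  induction row with
  | nil => simp [pvSmax_foldr]
  | cons x xs ih =>
    have hnn := pvSmax_head_nonneg xs
    simp only [List.foldr_cons, pvSmax_cons, pvSmaxStep, pvStepA, ih]
    split_ifs with h1 h2 <;> simp_all <;> omega

lemma pvRow_eq (row : List Int) : pvRowA row = pvRowB row := by
  induction row with
  | nil => simp [pvRowA, pvRowB]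
  | cons x xs ih =>
    have hnn := pvSmax_head_nonneg xs
    have hA : pvRowA (x :: xs) =
        (if x > (pvSmax xs).headD 0 then x
         else if x = 0 ∧ (pvSmax xs).headD 0 > 0 then (pvSmax xs).headD 0 else x) :: pvRowA xs := by
      simp only [pvRowA, List.foldr_cons, pvStepA, pvFoldA_snd]
      split_ifs <;> rfl
    have hB : pvRowB (x :: xs) =
        (if x = 0 ∧ (pvSmax xs).headD 0 > 0 then (pvSmax xs).headD 0 else x) :: pvRowB xs := by
      simp only [pvRowB, pvSmax_cons, pvSmaxStep, List.tail_cons]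
      rw [pvSmax_shape xs, List.zip_cons_cons, List.map_cons, List.tail_cons]
      simp
    rw [hA, hB, ih]
    congr 1
    split_ifs with h1 h2 <;> first | rfl | omega

-- ===== VERDICT (by name: the statement is the Claim_ definition above) =====
theorem replace_zeros_spec : Claim_equal_replace_zeros := by
  intro t _
  unfold Spec_replace_zeros replace_zeros replace_zeros_alt
  exact List.map_congr_left (fun r _ => pvRow_eq r)
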